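-- pv_equiv track=rewrite | github.com/GabrielSolorzanoD/UTN-TUPaD-P1 | 03 Estructuras Condicionales/condicionales.py | obtener_estacion
-- ===== SOURCE A (Python) =====
-- def obtener_estacion(hemisferio, mes, dia):
--     fecha = (mes, dia)
--
--     estaciones_norte = {
--         "invierno": [((12, 21), (3, 20))],
--         "primavera": [((3, 21), (6, 20))],
--         "verano": [((6, 21), (9, 20))],
--         "otoño": [((9, 21), (12, 20))]
--     }
--
--     estaciones_sur = {
--         "verano": estaciones_norte["invierno"],
--         "otoño": estaciones_norte["primavera"],
--         "invierno": estaciones_norte["verano"],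
--         "primavera": estaciones_norte["otoño"]
--     }
--
--     if hemisferio.upper() == 'N':
--         estaciones = estaciones_norte
--     elif hemisferio.upper() == 'S':
--         estaciones = estaciones_sur
--     else:
--         return "Hemisferio no válido."
--
--
--     for estacion, rangos in estaciones.items():
--         for inicio, fin in rangos:
--             if inicio <= fin:
--                 if inicio <= fecha <= fin:
--                     return estacion
--             else:
--                 if fecha >= inicio or fecha <= fin:
--                     return estacion
--
--     return "Fecha no válida."
-- ===== SOURCE B (Python) =====
-- def _estacion_norte(mes, dia):
--     fecha = (mes, dia)
--     if (12, 21) <= fecha or fecha <= (3, 20):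
--         return "invierno"
--     elif (3, 21) <= fecha <= (6, 20):
--         return "primavera"
--     elif (6, 21) <= fecha <= (9, 20):
--         return "verano"
--     elif (9, 21) <= fecha <= (12, 20):
--         return "otoño"
--     else:
--         return None
--
-- def _opuesta(estacion):
--     if estacion == "invierno":
--         return "verano"
--     elif estacion == "verano":
--         return "invierno"
--     elif estacion == "primavera":
--         return "otoño"
--     else:
--         return "primavera"
--
-- def obtener_estacion(hemisferio, mes, dia):
--     h = hemisferio.upper()
--     if h != 'N' and h != 'S':
--         return "Hemisferio no válido."
--     estacion = _estacion_norte(mes, dia)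
--     if estacion is None:
--         return "Fecha no válida."
--     return _opuesta(estacion) if h == 'S' else estacion
-- ===== Notes on version B (the rewrite author's own statement) =====
-- stated objective: simpler
-- what changed: Replaced the two season-range dictionaries and the nested first-match search loop with hemisphere validation, a single if/elif chain computing the northern season from (mes, dia), and a season-opposite mapping for 'S'.
import Mathlib
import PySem

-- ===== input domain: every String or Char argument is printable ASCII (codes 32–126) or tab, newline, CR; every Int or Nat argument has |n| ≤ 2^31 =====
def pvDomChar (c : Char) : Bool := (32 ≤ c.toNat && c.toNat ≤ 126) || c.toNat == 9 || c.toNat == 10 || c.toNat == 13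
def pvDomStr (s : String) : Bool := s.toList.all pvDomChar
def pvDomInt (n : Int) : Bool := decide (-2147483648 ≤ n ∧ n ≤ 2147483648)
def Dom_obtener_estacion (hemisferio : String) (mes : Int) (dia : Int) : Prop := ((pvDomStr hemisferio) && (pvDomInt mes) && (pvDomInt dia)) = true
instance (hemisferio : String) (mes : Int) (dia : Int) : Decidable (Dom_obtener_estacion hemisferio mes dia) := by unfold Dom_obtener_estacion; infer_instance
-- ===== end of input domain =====

-- B replaces A's two range-dictionaries and nested search loop by a plain if/elif chain on the
-- northern hemisphere plus a season-opposite map for 'S' (objective: simpler).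

-- Python tuple `a <= b` on (int, int): lexicographic (exact transliteration)
def pvTupLe (a b : Int × Int) : Bool := a.1 < b.1 || (a.1 == b.1 && a.2 ≤ b.2)

-- ===== PORT A =====
-- one (inicio, fin) range matches fecha?  (A's inner `if inicio <= fin … else …`)
def pvRangoOk (fecha inicio fin : Int × Int) : Bool :=
  if pvTupLe inicio fin then pvTupLe inicio fecha && pvTupLe fecha fin
  else pvTupLe inicio fecha || pvTupLe fecha fin

-- A's inner `for inicio, fin in rangos:` loop (returns on the first matching range)
def pvAlgunRango (fecha : Int × Int) : List ((Int × Int) × (Int × Int)) → Bool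
  | [] => false
  | (inicio, fin) :: rest =>
    if pvRangoOk fecha inicio fin then true else pvAlgunRango fecha rest

-- A's outer `for estacion, rangos in estaciones.items():` loop
def pvBuscar (fecha : Int × Int) : List (String × List ((Int × Int) × (Int × Int))) → String
  | [] => "Fecha no válida."
  | (estacion, rangos) :: rest =>
    if pvAlgunRango fecha rangos then estacion else pvBuscar fecha rest

def obtener_estacion (hemisferio : String) (mes : Int) (dia : Int) : String :=
  let fecha : Int × Int := (mes, dia)
  let estaciones_norte : List (String × List ((Int × Int) × (Int × Int))) :=
    [("invierno", [((12,21),(3,20))]), ("primavera", [((3,21),(6,20))]),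
     ("verano", [((6,21),(9,20))]), ("otoño", [((9,21),(12,20))])]
  let estaciones_sur : List (String × List ((Int × Int) × (Int × Int))) :=
    [("verano", [((12,21),(3,20))]), ("otoño", [((3,21),(6,20))]),
     ("invierno", [((6,21),(9,20))]), ("primavera", [((9,21),(12,20))])]
  if PySem.Str.upper hemisferio == "N" then pvBuscar fecha estaciones_norte
  else if PySem.Str.upper hemisferio == "S" then pvBuscar fecha estaciones_sur
  else "Hemisferio no válido."

-- ===== PORT B =====
def pvEstacionNorte (mes dia : Int) : Option String :=
  let fecha : Int × Int := (mes, dia)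
  if pvTupLe (12,21) fecha || pvTupLe fecha (3,20) then some "invierno"
  else if pvTupLe (3,21) fecha && pvTupLe fecha (6,20) then some "primavera"
  else if pvTupLe (6,21) fecha && pvTupLe fecha (9,20) then some "verano"
  else if pvTupLe (9,21) fecha && pvTupLe fecha (12,20) then some "otoño"
  else none

def pvOpuesta (estacion : String) : String :=
  if estacion == "invierno" then "verano"
  else if estacion == "verano" then "invierno"
  else if estacion == "primavera" then "otoño"
  else "primavera"

def obtener_estacion_alt (hemisferio : String) (mes : Int) (dia : Int) : String :=
  let h := PySem.Str.upper hemisferio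
  if h != "N" && h != "S" then "Hemisferio no válido."
  else
    match pvEstacionNorte mes dia with
    | none => "Fecha no válida."
    | some estacion => if h == "S" then pvOpuesta estacion else estacion

-- ===== PRECONDITION & SPEC =====
def Spec_obtener_estacion (hemisferio : String) (mes : Int) (dia : Int) (out : String) : Prop := out = obtener_estacion_alt hemisferio mes dia
instance (hemisferio : String) (mes : Int) (dia : Int) (out : String) : Decidable (Spec_obtener_estacion hemisferio mes dia out) := by unfold Spec_obtener_estacion; infer_instance

-- ===== CLAIM (what is proved, stated in full; the proofs are below) =====
def Claim_equal_obtener_estacion : Prop := ∀ (hemisferio : String) (mes : Int) (dia : Int), Dom_obtener_estacion hemisferio mes dia → Spec_obtener_estacion hemisferio mes dia (obtener_estacion hemisferio mes dia)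

-- ===== LEMMAS AND PROOFS =====

-- ===== VERDICT (by name: the statement is the Claim_ definition above) =====
set_option maxHeartbeats 1000000 in
theorem obtener_estacion_spec : Claim_equal_obtener_estacion := by
  intro h m d _
  unfold Spec_obtener_estacion obtener_estacion obtener_estacion_alt
  have r1 : ∀ f : Int × Int, pvRangoOk f (12,21) (3,20) = (pvTupLe (12,21) f || pvTupLe f (3,20)) := fun _ => rfl
  have r2 : ∀ f : Int × Int, pvRangoOk f (3,21) (6,20) = (pvTupLe (3,21) f && pvTupLe f (6,20)) := fun _ => rfl
  have r3 : ∀ f : Int × Int, pvRangoOk f (6,21) (9,20) = (pvTupLe (6,21) f && pvTupLe f (9,20)) := fun _ => rfl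
  have r4 : ∀ f : Int × Int, pvRangoOk f (9,21) (12,20) = (pvTupLe (9,21) f && pvTupLe f (12,20)) := fun _ => rfl
  cases hN : PySem.Str.upper h == "N" <;> cases hS : PySem.Str.upper h == "S"
  case true.true =>
    simp only [beq_iff_eq] at hN hS
    exact absurd (hN ▸ hS) (by decide)
  case false.false =>
    simp_all
  all_goals
    cases hc1 : (pvTupLe (12,21) (m,d) || pvTupLe (m,d) (3,20)) <;>
    cases hc2 : (pvTupLe (3,21) (m,d) && pvTupLe (m,d) (6,20)) <;>
    cases hc3 : (pvTupLe (6,21) (m,d) && pvTupLe (m,d) (9,20)) <;>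
    cases hc4 : (pvTupLe (9,21) (m,d) && pvTupLe (m,d) (12,20)) <;>
      simp [hN, hS, pvBuscar, pvAlgunRango, pvEstacionNorte, pvOpuesta,
        r1, r2, r3, r4, hc1, hc2, hc3, hc4] <;> simp_all
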